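-- pv_equiv track=rewrite | github.com/FedorChayka/FFT_temperaments | code/pitch2note.py | get_monzo
-- ===== SOURCE A (Python) =====
-- def prime_factors(n):
--     i = 2
--     factors = []
--     while i * i <= n:
--         if n % i:
--             i += 1
--         else:
--             n //= i
--             factors.append(i)
--     if n > 1:
--         factors.append(n)
--     return factors
--
-- PRIMES = [2, 3, 5, 7, 11, 13, 17, 19, 23, 29]
--
-- def get_monzo(limit, n, d):
--     # limit primes by limit
--     avail_primes = [p for p in PRIMES if p <= limit]
--
--     monzo = [0] * len(avail_primes)
--
--     for p in prime_factors(n):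
--         try:
--             idx = avail_primes.index(p)
--         except ValueError:
--             raise ValueError(f"can't make monzo for {n}/{d} with limit {limit}")
--
--         monzo[idx] = monzo[idx] + 1
--
--     for p in prime_factors(d):
--         try:
--             idx = avail_primes.index(p)
--         except ValueError:
--             raise ValueError(f"can't make monzo for {n}/{d} with limit {limit}")
--
--         monzo[idx] = monzo[idx] - 1
--
--     return monzo
-- ===== SOURCE B (Python) =====
-- PRIMES = [2, 3, 5, 7, 11, 13, 17, 19, 23, 29]
--
-- def get_monzo(limit, n, d):
--     avail_primes = [p for p in PRIMES if p <= limit]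
--
--     def exponents(m):
--         out = []
--         for p in avail_primes:
--             e = 0
--             while m > 1 and m % p == 0:
--                 m //= p
--                 e += 1
--             out.append(e)
--         if m > 1:
--             raise ValueError(f"can't make monzo for {n}/{d} with limit {limit}")
--         return out
--
--     en = exponents(n)
--     ed = exponents(d)
--     return [a - b for a, b in zip(en, ed)]
-- ===== Notes on version B (the rewrite author's own statement) =====
-- stated objective: simpler
-- what changed: Drops the generic trial-division prime_factors helper and the list.index/try-except bookkeeping: B divides each available prime out of n and of d directly, collecting the exponent per prime, and combines the two exponent vectors with a zip.
import Mathlib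
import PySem

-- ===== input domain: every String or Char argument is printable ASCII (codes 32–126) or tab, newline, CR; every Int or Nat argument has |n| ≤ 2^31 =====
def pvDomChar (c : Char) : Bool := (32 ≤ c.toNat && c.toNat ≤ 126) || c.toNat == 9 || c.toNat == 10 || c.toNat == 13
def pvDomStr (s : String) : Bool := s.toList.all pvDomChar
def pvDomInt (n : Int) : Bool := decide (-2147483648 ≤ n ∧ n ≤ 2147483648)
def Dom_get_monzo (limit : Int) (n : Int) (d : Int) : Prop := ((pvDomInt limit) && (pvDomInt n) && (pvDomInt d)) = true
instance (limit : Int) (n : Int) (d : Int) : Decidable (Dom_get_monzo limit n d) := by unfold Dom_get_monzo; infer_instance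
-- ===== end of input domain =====

-- B replaces the trial-division prime_factors helper plus list.index bookkeeping by directly
-- dividing each available prime out of n and d and zipping the two exponent vectors (objective: simpler).

-- ===== PORT A =====

def pvPRIMES : List Int := [2, 3, 5, 7, 11, 13, 17, 19, 23, 29]

-- the 'while i * i <= n' loop of prime_factors; returns (final n, factors).
-- fuel is only a totality guard: callers pass enough for the loop to finish on its own test.
def pfLoop : Nat → Int → Int → List Int → Int × List Int
  | 0, _, n, factors => (n, factors)
  | fuel + 1, i, n, factors =>
    if i * i ≤ n then
      if PySem.Int.mod n i ≠ 0 then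
        pfLoop fuel (i + 1) n factors
      else
        pfLoop fuel i (PySem.Int.floordiv n i) (factors ++ [i])
    else
      (n, factors)

def prime_factors (n : Int) : List Int :=
  let r := pfLoop (n.toNat + 2) 2 n []
  if r.1 > 1 then r.2 ++ [r.1] else r.2

-- one step of A's for-loops: look up p in avail_primes and bump monzo there; none = the ValueError
def bump (avail : List Int) (sign : Int) : Option (List Int) → Int → Option (List Int)
  | none, _ => none
  | some monzo, p =>
    match PySem.List.index? avail p with
    | none => none
    | some idx => some (monzo.set idx (monzo.getD idx 0 + sign))

def get_monzo (limit : Int) (n : Int) (d : Int) : List Int :=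
  let avail := pvPRIMES.filter (fun p => decide (p ≤ limit))
  let monzo : List Int := List.replicate avail.length 0
  match (prime_factors n).foldl (bump avail 1) (some monzo) with
  | none => []  -- Python raises ValueError here (excluded by Pre_)
  | some m1 =>
    match (prime_factors d).foldl (bump avail (-1)) (some m1) with
    | none => []  -- Python raises ValueError here (excluded by Pre_)
    | some m2 => m2

-- ===== PORT B =====

-- the 'while m > 1 and m % p == 0' loop of B; returns (remaining m, exponent).
-- The '2 ≤ p' conjunct is only a totality guard: every p comes from PRIMES.
-- the 'while m > 1 and m % p == 0' loop of B; returns (remaining m, exponent).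
-- fuel is only a totality guard: the caller passes m.toNat + 1, enough for the loop to finish.
def divOut : Nat → Int → Int → Int → Int × Int
  | 0, _, m, e => (m, e)
  | fuel + 1, p, m, e =>
    if 1 < m ∧ PySem.Int.mod m p = 0 then
      divOut fuel p (PySem.Int.floordiv m p) (e + 1)
    else
      (m, e)

-- the 'for p in avail_primes' loop of B's exponents helper
def expLoop (ps : List Int) (m : Int) (acc : List Int) : Int × List Int :=
  match ps with
  | [] => (m, acc)
  | p :: rest =>
    let r := divOut (m.toNat + 1) p m 0
    expLoop rest r.1 (acc ++ [r.2])

-- B's exponents helper; none = the ValueError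
def exponents (avail : List Int) (m : Int) : Option (List Int) :=
  let r := expLoop avail m []
  if r.1 > 1 then none else some r.2

def get_monzo_alt (limit : Int) (n : Int) (d : Int) : List Int :=
  let avail := pvPRIMES.filter (fun p => decide (p ≤ limit))
  match exponents avail n, exponents avail d with
  | some en, some ed => List.zipWith (· - ·) en ed
  | _, _ => []  -- Python raises ValueError here (excluded by Pre_)

-- ===== PRECONDITION & SPEC =====

-- Pre_ excludes exactly the inputs on which A raises ValueError: those where n or d has a prime
-- factor exceeding limit or 29; B raises the very same ValueError there.  For every k ≥ 2,
-- k ∣ (∏ avail)^(log₂ k + 1) holds iff all prime factors of k are available (each exponent of k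
-- is at most log₂ k), so this is exact smoothness with no size cap.
def pvSmoothBound (limit : Int) (m : Int) : Nat :=
  (((pvPRIMES.filter (fun p => decide (p ≤ limit))).map Int.toNat).prod) ^ (Nat.log 2 m.toNat + 1)

def Pre_get_monzo (limit : Int) (n : Int) (d : Int) : Prop :=
  (n ≤ 1 ∨ n.toNat ∣ pvSmoothBound limit n) ∧ (d ≤ 1 ∨ d.toNat ∣ pvSmoothBound limit d)

instance (limit : Int) (n : Int) (d : Int) : Decidable (Pre_get_monzo limit n d) := by
  unfold Pre_get_monzo; infer_instance

def pvWitness_get_monzo : Int × Int × Int := (7, 6, 5)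

def Spec_get_monzo (limit : Int) (n : Int) (d : Int) (out : List Int) : Prop := out = get_monzo_alt limit n d
instance (limit : Int) (n : Int) (d : Int) (out : List Int) : Decidable (Spec_get_monzo limit n d out) := by unfold Spec_get_monzo; infer_instance

-- ===== CLAIM (what is proved, stated in full; the proofs are below) =====
def Claim_equal_get_monzo : Prop := ∀ (limit : Int) (n : Int) (d : Int), Dom_get_monzo limit n d → Pre_get_monzo limit n d → Spec_get_monzo limit n d (get_monzo limit n d)


-- ===== LEMMAS AND PROOFS =====

-- helper for the fuel bounds of the two loops
theorem pv_ediv_lt_self (a b : Int) (h : 0 < a) (h2 : 1 < b) : a / b < a := by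
  rcases lt_or_ge (a / b) a with h3 | h3
  · exact h3
  · exfalso
    have h4 : a * b ≤ a := by
      calc a * b ≤ (a / b) * b := by nlinarith
        _ ≤ a := Int.ediv_mul_le a (by omega)
    nlinarith

-- abbreviation used throughout: the p-adic exponent of m (0 for m ≤ 1, via toNat)
def pvEx (m : Int) (q : Nat) : Int := (m.toNat.factorization q : Int)

-- ---- generic facts ----

theorem pv_dvd_cast (k n : Int) (hn : 0 ≤ n) (hk : 0 ≤ k) :
    k ∣ n ↔ k.toNat ∣ n.toNat := by
  constructor
  · intro h
    have h1 := Int.natAbs_dvd_natAbs.mpr h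
    have e1 : k.natAbs = k.toNat := by omega
    have e2 : n.natAbs = n.toNat := by omega
    rwa [e1, e2] at h1
  · intro h
    have h2 : (k.toNat : Int) ∣ (n.toNat : Int) := Int.natCast_dvd_natCast.mpr h
    rwa [Int.toNat_of_nonneg hk, Int.toNat_of_nonneg hn] at h2

theorem pv_prime_of_no_small (i n : Int) (hi : 2 ≤ i) (hn : 1 ≤ n) (hdvd : i ∣ n)
    (hnd : ∀ k : Int, 2 ≤ k → k < i → ¬ k ∣ n) : i.toNat.Prime := by
  by_contra hnp
  have h2 : 2 ≤ i.toNat := by omega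
  have hne1 : i.toNat ≠ 1 := by omega
  have hkp : (i.toNat.minFac).Prime := Nat.minFac_prime hne1
  have hkd : i.toNat.minFac ∣ i.toNat := Nat.minFac_dvd _
  have hkne : i.toNat.minFac ≠ i.toNat := by
    intro h; exact hnp (h ▸ hkp)
  have hklt : i.toNat.minFac < i.toNat :=
    lt_of_le_of_ne (Nat.le_of_dvd (by omega) hkd) hkne
  have hkdn : (i.toNat.minFac : Int) ∣ n := by
    refine dvd_trans ?_ hdvd
    have : (i.toNat.minFac : Int) ∣ (i.toNat : Int) := Int.natCast_dvd_natCast.mpr hkd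
    simpa [Int.toNat_of_nonneg (by omega : (0:Int) ≤ i)] using this
  exact hnd _ (by exact_mod_cast hkp.two_le) (by omega) hkdn

theorem pv_prime_of_exit (i n : Int) (hi : 2 ≤ i) (hn : 1 < n) (hii : n < i * i)
    (hnd : ∀ k : Int, 2 ≤ k → k < i → ¬ k ∣ n) : n.toNat.Prime := by
  by_contra hnp
  have h2 : 2 ≤ n.toNat := by omega
  have hne1 : n.toNat ≠ 1 := by omega
  have hkp : (n.toNat.minFac).Prime := Nat.minFac_prime hne1
  have hkd : n.toNat.minFac ∣ n.toNat := Nat.minFac_dvd _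
  have hsq : n.toNat.minFac ^ 2 ≤ n.toNat := Nat.minFac_sq_le_self (by omega) hnp
  have hklt : (n.toNat.minFac : Int) < i := by
    by_contra hge
    push_neg at hge
    have : i * i ≤ (n.toNat.minFac : Int) * (n.toNat.minFac : Int) := by nlinarith
    have hc : ((n.toNat.minFac ^ 2 : Nat) : Int) ≤ n := by
      have hc2 : ((n.toNat.minFac ^ 2 : Nat) : Int) ≤ (n.toNat : Int) := by exact_mod_cast hsq
      rwa [Int.toNat_of_nonneg (by omega : (0:Int) ≤ n)] at hc2
    push_cast at hc
    nlinarith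
  have hkdn : (n.toNat.minFac : Int) ∣ n := by
    have : (n.toNat.minFac : Int) ∣ (n.toNat : Int) := Int.natCast_dvd_natCast.mpr hkd
    simpa [Int.toNat_of_nonneg (by omega : (0:Int) ≤ n)] using this
  exact hnd _ (by exact_mod_cast hkp.two_le) hklt hkdn

-- ---- A side: characterisation of prime_factors ----

theorem pfLoop_spec (fuel : Nat) (i n : Int) (acc : List Int) (hi : 2 ≤ i) (hn : 1 ≤ n)
    (hfuel : (n - i).toNat < fuel)
    (hnd : ∀ k : Int, 2 ≤ k → k < i → ¬ k ∣ n) :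
    ∃ L, pfLoop fuel i n acc = ((pfLoop fuel i n acc).1, acc ++ L) ∧
      1 ≤ (pfLoop fuel i n acc).1 ∧
      L.prod * (pfLoop fuel i n acc).1 = n ∧
      (∀ q ∈ L, 2 ≤ q ∧ q.toNat.Prime) ∧
      (1 < (pfLoop fuel i n acc).1 → (pfLoop fuel i n acc).1.toNat.Prime) := by
  induction fuel generalizing i n acc with
  | zero => omega
  | succ f ih =>
    by_cases hle : i * i ≤ n
    · have h2i : 2 * i ≤ i * i := by nlinarith
      have hni : 2 ≤ n - i := by omega
      by_cases hmod : PySem.Int.mod n i ≠ 0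
      · have hndvd : ¬ i ∣ n := fun hd => hmod ((PySem.Int.mod_eq_zero_iff_dvd n i).mpr hd)
        rw [pfLoop, if_pos hle, if_pos hmod]
        refine ih (i + 1) n acc (by omega) hn (by omega) ?_
        intro k hk1 hk2
        rcases (by omega : k < i ∨ k = i) with hk | rfl
        · exact hnd k hk1 hk
        · exact hndvd
      · have hmod0 : PySem.Int.mod n i = 0 := by
          by_contra hc; exact hmod hc
        have hdvd : i ∣ n := (PySem.Int.mod_eq_zero_iff_dvd n i).mp hmod0
        have hfd : PySem.Int.floordiv n i = n / i := PySem.Int.floordiv_eq_ediv_of_pos (by omega)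
        have hin : i * (n / i) = n := Int.mul_ediv_cancel' hdvd
        have hn' : 1 ≤ PySem.Int.floordiv n i := by
          rw [hfd]
          rw [Int.le_ediv_iff_mul_le (by omega : (0:Int) < i)]
          omega
        have hlt : PySem.Int.floordiv n i < n := by
          rw [hfd]
          exact pv_ediv_lt_self n i (by omega) (by omega)
        have hnd' : ∀ k : Int, 2 ≤ k → k < i → ¬ k ∣ PySem.Int.floordiv n i := by
          intro k hk1 hk2 hkd
          exact hnd k hk1 hk2 (hkd.trans ⟨i, by rw [hfd, mul_comm]; exact hin.symm⟩)
        obtain ⟨L', he, hm1, hprod, hall, hfin⟩ :=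
          ih i (PySem.Int.floordiv n i) (acc ++ [i]) hi hn' (by omega) hnd'
        rw [pfLoop, if_pos hle, if_neg hmod]
        refine ⟨i :: L', ?_, hm1, ?_, ?_, hfin⟩
        · rw [he]; simp
        · rw [List.prod_cons, mul_assoc, hprod, hfd, hin]
        · intro q hq
          rcases List.mem_cons.mp hq with rfl | hq'
          · exact ⟨hi, pv_prime_of_no_small q n hi hn hdvd hnd⟩
          · exact hall q hq'
    · rw [pfLoop, if_neg hle]
      refine ⟨[], by simp, hn, by simp, by simp, ?_⟩
      intro h1
      exact pv_prime_of_exit i n hi h1 (by omega) hnd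

theorem prime_factors_spec (n : Int) (hn : 1 ≤ n) :
    (prime_factors n).prod = n ∧ ∀ q ∈ prime_factors n, 2 ≤ q ∧ q.toNat.Prime := by
  obtain ⟨L, he, hm1, hprod, hall, hfin⟩ :=
    pfLoop_spec (n.toNat + 2) 2 n [] (by norm_num) hn (by omega)
      (by intro k hk1 hk2 _; omega)
  have h2 : (pfLoop (n.toNat + 2) 2 n []).2 = L := by
    have := congrArg Prod.snd he
    simpa using this
  rw [prime_factors]
  simp only [h2]
  split_ifs with hgt
  · constructor
    · rw [List.prod_append, List.prod_singleton, hprod]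
    · intro q hq
      rcases List.mem_append.mp hq with hq' | hq'
      · exact hall q hq'
      · have : q = (pfLoop (n.toNat + 2) 2 n []).1 := by simpa using hq'
        subst this
        exact ⟨by omega, hfin hgt⟩
  · have hm : (pfLoop (n.toNat + 2) 2 n []).1 = 1 := by omega
    rw [hm, mul_one] at hprod
    exact ⟨hprod, hall⟩

theorem prime_factors_nil (n : Int) (hn : n ≤ 1) : prime_factors n = [] := by
  have h : ¬ ((2:Int) * 2 ≤ n) := by omega
  rw [prime_factors, pfLoop, if_neg h]
  simp
  omega

theorem pf_count (n : Int) (q : Nat) (hn : 1 ≤ n) :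
    (prime_factors n).count (q : Int) = n.toNat.factorization q := by
  obtain ⟨hprod, hall⟩ := prime_factors_spec n hn
  have hLcast : ((prime_factors n).map Int.toNat).map (Nat.cast : Nat → Int) = prime_factors n := by
    rw [List.map_map]
    have hptw : ∀ x ∈ prime_factors n, ((Nat.cast : Nat → Int) ∘ Int.toNat) x = id x := by
      intro x hx
      simp only [Function.comp_apply, id]
      exact Int.toNat_of_nonneg (by have := (hall x hx).1; omega)
    rw [List.map_congr_left hptw, List.map_id]
  have hLNprime : ∀ x ∈ (prime_factors n).map Int.toNat, x.Prime := by
    intro x hx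
    rw [List.mem_map] at hx
    obtain ⟨y, hy, rfl⟩ := hx
    exact (hall y hy).2
  have hLNprod : ((prime_factors n).map Int.toNat).prod = n.toNat := by
    have hc : ((((prime_factors n).map Int.toNat).prod : Nat) : Int) = ((n.toNat : Nat) : Int) := by
      rw [Nat.cast_list_prod, hLcast, hprod, Int.toNat_of_nonneg (by omega : (0:Int) ≤ n)]
    exact_mod_cast hc
  have hperm : ((prime_factors n).map Int.toNat).Perm (Nat.primeFactorsList n.toNat) :=
    Nat.primeFactorsList_unique hLNprod hLNprime
  calc (prime_factors n).count ((q : Nat) : Int)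
      = (((prime_factors n).map Int.toNat).map (Nat.cast : Nat → Int)).count ((q : Nat) : Int) := by
        rw [hLcast]
    _ = ((prime_factors n).map Int.toNat).count q := by
        exact List.count_map_of_injective _ _ (fun a b h => by exact_mod_cast h) q
    _ = (Nat.primeFactorsList n.toNat).count q := hperm.count_eq q
    _ = n.toNat.factorization q := Nat.primeFactorsList_count_eq

theorem pf_dvd (n : Int) (q : Int) (hn : 1 ≤ n) (hq : q ∈ prime_factors n) : q ∣ n := by
  obtain ⟨hprod, _⟩ := prime_factors_spec n hn
  exact hprod ▸ List.dvd_prod hq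

-- ---- avail_primes facts ----

theorem pv_mem_PRIMES_elim (x : Int) (hx : x ∈ pvPRIMES) : 2 ≤ x ∧ x ≤ 29 ∧ x.toNat.Prime := by
  fin_cases hx <;> exact ⟨by norm_num, by norm_num, by decide⟩

theorem pv_avail_elim (limit x : Int) (hx : x ∈ pvPRIMES.filter (fun p => decide (p ≤ limit))) :
    2 ≤ x ∧ x ≤ 29 ∧ x ≤ limit ∧ x.toNat.Prime := by
  rw [List.mem_filter] at hx
  obtain ⟨h1, h2, h3⟩ := pv_mem_PRIMES_elim x hx.1
  exact ⟨h1, h2, by simpa using hx.2, h3⟩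

theorem pv_avail_nodup (limit : Int) : (pvPRIMES.filter (fun p => decide (p ≤ limit))).Nodup :=
  List.Nodup.filter _ (by decide)

theorem pv_mem_avail (limit : Int) (q : Nat) (hq : q.Prime) (h29 : q ≤ 29) (hl : (q : Int) ≤ limit) :
    (q : Int) ∈ pvPRIMES.filter (fun p => decide (p ≤ limit)) := by
  rw [List.mem_filter]
  refine ⟨?_, by simpa using hl⟩
  have : ∀ m : Nat, m < 30 → m.Prime → (m : Int) ∈ pvPRIMES := by decide
  exact this q (by omega) hq

-- Pre_ really says: every prime factor of a value > 1 is admissible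
theorem pv_smooth_elim (limit m : Int) (hm : 1 < m)
    (hdvd : m.toNat ∣ pvSmoothBound limit m)
    (q : Nat) (hq : q.Prime) (hqm : q ∣ m.toNat) :
    (q : Int) ≤ limit ∧ q ≤ 29 := by
  have hqP : q ∣ pvSmoothBound limit m := hqm.trans hdvd
  rw [pvSmoothBound] at hqP
  have hqprod : q ∣ (((pvPRIMES.filter (fun p => decide (p ≤ limit))).map Int.toNat).prod) :=
    hq.prime.dvd_of_dvd_pow hqP
  obtain ⟨a, ha, hqa⟩ := (Prime.dvd_prod_iff hq.prime).mp hqprod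
  rw [List.mem_map] at ha
  obtain ⟨p, hp, rfl⟩ := ha
  obtain ⟨hp2, hp29, hplim, hpp⟩ := pv_avail_elim limit p hp
  have hqep : q = p.toNat := (Nat.prime_dvd_prime_iff_eq hq hpp).mp hqa
  subst hqep
  constructor
  · simpa [Int.toNat_of_nonneg (by omega : (0:Int) ≤ p)] using hplim
  · omega

-- every factor A finds lies in avail_primes (under Pre_)
theorem pf_mem_avail (limit n : Int) (hn : 1 ≤ n)
    (hsm : n ≤ 1 ∨ n.toNat ∣ pvSmoothBound limit n)
    (q : Int) (hq : q ∈ prime_factors n) :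
    q ∈ pvPRIMES.filter (fun p => decide (p ≤ limit)) := by
  obtain ⟨_, hall⟩ := prime_factors_spec n hn
  obtain ⟨hq2, hqp⟩ := hall q hq
  have hqn : q ∣ n := pf_dvd n q hn hq
  rcases hsm with h1 | hdvd
  · have : prime_factors n = [] := prime_factors_nil n h1
    simp [this] at hq
  · rcases lt_or_ge 1 n with hn1 | hn1
    · have hqnat : q.toNat ∣ n.toNat := (pv_dvd_cast q n (by omega) (by omega)).mp hqn
      obtain ⟨hl, h29⟩ := pv_smooth_elim limit n hn1 hdvd q.toNat hqp hqnat
      have := pv_mem_avail limit q.toNat hqp h29 hl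
      simpa [Int.toNat_of_nonneg (by omega : (0:Int) ≤ q)] using this
    · have : prime_factors n = [] := prime_factors_nil n (by omega)
      simp [this] at hq

-- ---- A side: the bump folds count occurrences ----

theorem foldl_bump_spec (avail : List Int) (hnd : avail.Nodup) (sign : Int) (fs : List Int)
    (hfs : ∀ q ∈ fs, q ∈ avail) (monzo : List Int) (hlen : monzo.length = avail.length) :
    ∃ monzo', fs.foldl (bump avail sign) (some monzo) = some monzo' ∧
      monzo'.length = avail.length ∧
      ∀ j (hj : j < avail.length), monzo'.getD j 0 = monzo.getD j 0 + sign * fs.count avail[j] := by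
  induction fs generalizing monzo with
  | nil => exact ⟨monzo, rfl, hlen, by intro j hj; simp⟩
  | cons q fs ih =>
    have hqa : q ∈ avail := hfs q (List.mem_cons_self)
    obtain ⟨k, hk⟩ : ∃ k, PySem.List.index? avail q = some k :=
      Option.isSome_iff_exists.mp ((PySem.List.index?_isSome_iff avail q).mpr hqa)
    obtain ⟨hklt, hkeq, -⟩ := PySem.List.getElem_of_index?_eq_some hk
    have hstep : (q :: fs).foldl (bump avail sign) (some monzo) =
        fs.foldl (bump avail sign) (some (monzo.set k (monzo.getD k 0 + sign))) := by
      rw [List.foldl_cons]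
      have hk2 := hk
      rw [PySem.List.index?_eq_idxOf?] at hk2
      simp [bump, hk2]
    obtain ⟨monzo', hfold, hlen', hval⟩ :=
      ih (fun x hx => hfs x (List.mem_cons_of_mem _ hx))
        (monzo.set k (monzo.getD k 0 + sign)) (by simpa using hlen)
    refine ⟨monzo', by rw [hstep]; exact hfold, hlen', ?_⟩
    intro j hj
    have hjm : j < monzo.length := by omega
    have hm1j : (monzo.set k (monzo.getD k 0 + sign)).getD j 0 =
        monzo.getD j 0 + (if j = k then sign else 0) := by
      by_cases hjk : j = k
      · subst hjk
        rw [List.getD_eq_getElem?_getD, List.getElem?_set_self hjm, List.getD_eq_getElem?_getD]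
        simp
      · rw [List.getD_eq_getElem?_getD, List.getElem?_set_ne (fun hc => hjk hc.symm),
          ← List.getD_eq_getElem?_getD]
        simp [hjk]
    have hcnt : ((q :: fs).count avail[j] : Int) =
        (fs.count avail[j] : Int) + (if j = k then 1 else 0) := by
      by_cases hjk : j = k
      · subst hjk
        rw [hkeq]
        simp [List.count_cons]
      · have hne : avail[j] ≠ q := by
          intro hc
          exact hjk ((List.Nodup.getElem_inj_iff hnd).mp (hc.trans hkeq.symm))
        simp [List.count_cons, hne, hjk, Ne.symm hne]
    rw [hval j hj, hm1j, hcnt]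
    by_cases hjk : j = k <;> simp [hjk] <;> ring

-- ---- B side: divOut computes the exact exponent ----

theorem divOut_spec (fuel : Nat) (p : Nat) (hp : p.Prime) (m e : Int) (hm : 1 ≤ m)
    (hfuel : m.toNat < fuel) :
    ∃ m', divOut fuel (p : Int) m e = (m', e + (m.toNat.factorization p : Int)) ∧ 1 ≤ m' ∧
      m'.toNat.factorization p = 0 ∧
      (∀ q : Nat, q ≠ p → m'.toNat.factorization q = m.toNat.factorization q) ∧
      m' ∣ m := by
  induction fuel generalizing m e with
  | zero => omega
  | succ f ih =>
    by_cases h : 1 < m ∧ PySem.Int.mod m (p : Int) = 0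
    · have hppos : (0:Int) < (p:Int) := by exact_mod_cast hp.pos
      have hp2 : (2:Int) ≤ (p:Int) := by exact_mod_cast hp.two_le
      have hdvd : (p : Int) ∣ m := (PySem.Int.mod_eq_zero_iff_dvd m (p:Int)).mp h.2
      have hfd : PySem.Int.floordiv m (p:Int) = m / (p:Int) := PySem.Int.floordiv_eq_ediv_of_pos hppos
      have hple : (p:Int) ≤ m := Int.le_of_dvd (by omega) hdvd
      have hm1 : 1 ≤ PySem.Int.floordiv m (p:Int) := by
        rw [hfd, Int.le_ediv_iff_mul_le hppos]; omega
      have hlt : PySem.Int.floordiv m (p:Int) < m := by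
        rw [hfd]
        exact pv_ediv_lt_self m (p:Int) (by omega) (by omega)
      have hmul : (p:Int) * (m / (p:Int)) = m := Int.mul_ediv_cancel' hdvd
      have hcast : ((p * (PySem.Int.floordiv m (p:Int)).toNat : Nat) : Int) = m := by
        push_cast
        rw [Int.toNat_of_nonneg (by omega : (0:Int) ≤ PySem.Int.floordiv m (p:Int)), hfd]
        exact hmul
      have hmulN : m.toNat = p * (PySem.Int.floordiv m (p:Int)).toNat := by
        have h2 := congrArg Int.toNat hcast
        rw [Int.toNat_natCast] at h2
        exact h2.symm
      have hm1ne : (PySem.Int.floordiv m (p:Int)).toNat ≠ 0 := by omega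
      have hfmul : m.toNat.factorization = p.factorization + (PySem.Int.floordiv m (p:Int)).toNat.factorization := by
        rw [hmulN, Nat.factorization_mul hp.pos.ne' hm1ne]
      have hfp : m.toNat.factorization p = (PySem.Int.floordiv m (p:Int)).toNat.factorization p + 1 := by
        rw [hfmul]
        simp [hp.factorization_self]
        omega
      have hfq : ∀ q : Nat, q ≠ p → m.toNat.factorization q = (PySem.Int.floordiv m (p:Int)).toNat.factorization q := by
        intro q hq
        rw [hfmul]
        simp [Nat.Prime.factorization hp, Ne.symm hq]
      obtain ⟨m', heq, hm'1, hm'p, hm'q, hm'd⟩ :=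
        ih (PySem.Int.floordiv m (p:Int)) (e + 1) hm1 (by omega)
      refine ⟨m', ?_, hm'1, hm'p, ?_, ?_⟩
      · rw [divOut, if_pos h, heq]
        have : (m.toNat.factorization p : Int) = ((PySem.Int.floordiv m (p:Int)).toNat.factorization p : Int) + 1 := by
          exact_mod_cast hfp
        rw [this]
        ring_nf
      · intro q hq
        rw [hm'q q hq, ← hfq q hq]
      · exact hm'd.trans ⟨(p:Int), by rw [mul_comm, hfd]; exact hmul.symm⟩
    · have hf0 : m.toNat.factorization p = 0 := by
        rcases (by tauto : ¬ (1 < m) ∨ ¬ PySem.Int.mod m (p:Int) = 0) with h1 | h1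
        · have hone : m.toNat = 1 := by omega
          simp [hone]
        · have hnd : ¬ (p:Int) ∣ m := fun hc => h1 ((PySem.Int.mod_eq_zero_iff_dvd m (p:Int)).mpr hc)
          have hndN : ¬ p ∣ m.toNat := by
            intro hc
            refine hnd ((pv_dvd_cast (p:Int) m (by omega) (by exact_mod_cast hp.pos.le)).mpr ?_)
            simpa using hc
          exact Nat.factorization_eq_zero_of_not_dvd hndN
      refine ⟨m, ?_, hm, hf0, fun q _ => rfl, dvd_refl m⟩
      rw [divOut, if_neg h]
      simp [hf0]

theorem expLoop_spec (ps : List Int)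
    (hps : ∀ x ∈ ps, 2 ≤ x ∧ x.toNat.Prime) (hnd : ps.Nodup)
    (m : Int) (hm : 1 ≤ m) (acc : List Int) :
    ∃ m', expLoop ps m acc = (m', acc ++ ps.map (fun x => pvEx m x.toNat)) ∧ 1 ≤ m' ∧
      (∀ x ∈ ps, m'.toNat.factorization x.toNat = 0) ∧
      (∀ q : Nat, (q : Int) ∉ ps → m'.toNat.factorization q = m.toNat.factorization q) ∧
      m' ∣ m := by
  induction ps generalizing m acc with
  | nil => exact ⟨m, by simp [expLoop], hm, by simp, fun q _ => rfl, dvd_refl m⟩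
  | cons x rest ih =>
    obtain ⟨hx2, hxp⟩ := hps x (List.mem_cons_self)
    have hxc : ((x.toNat : Nat) : Int) = x := Int.toNat_of_nonneg (by omega)
    obtain ⟨m1, hdeq, hm1, hm1p, hm1q, hm1d⟩ := divOut_spec (m.toNat + 1) x.toNat hxp m 0 hm (by omega)
    rw [hxc] at hdeq
    obtain ⟨m', heq, hm'1, hzero, hpres, hm'd⟩ :=
      ih (fun y hy => hps y (List.mem_cons_of_mem _ hy)) (List.Nodup.of_cons hnd) m1 hm1
        (acc ++ [0 + (m.toNat.factorization x.toNat : Int)])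
    have hxnotin : x ∉ rest := (List.nodup_cons.mp hnd).1
    have hmapeq : rest.map (fun y => pvEx m1 y.toNat) = rest.map (fun y => pvEx m y.toNat) := by
      refine List.map_congr_left ?_
      intro y hy
      have hy2 : 2 ≤ y := (hps y (List.mem_cons_of_mem _ hy)).1
      have hyne : y.toNat ≠ x.toNat := by
        intro hc
        exact hxnotin (by
          have : y = x := by omega
          exact this ▸ hy)
      simp only [pvEx]
      rw [hm1q y.toNat hyne]
    refine ⟨m', ?_, hm'1, ?_, ?_, hm'd.trans hm1d⟩
    · rw [expLoop]
      simp only [hdeq]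
      rw [heq, hmapeq]
      simp [pvEx]
    · intro y hy
      rcases List.mem_cons.mp hy with rfl | hy'
      · have : (y.toNat : Int) ∉ rest := by rwa [hxc]
        rw [hpres y.toNat this]
        exact hm1p
      · exact hzero y hy'
    · intro q hq
      have hq1 : (q : Int) ∉ rest := fun hc => hq (List.mem_cons_of_mem _ hc)
      have hq2 : q ≠ x.toNat := by
        intro hc
        exact hq (by
          subst hc
          rw [hxc]
          exact List.mem_cons_self)
      rw [hpres q hq1, hm1q q hq2]

theorem expLoop_le_one (ps : List Int) (m : Int) (hm : m ≤ 1) (acc : List Int) :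
    expLoop ps m acc = (m, acc ++ ps.map (fun _ => 0)) := by
  induction ps generalizing acc with
  | nil => simp [expLoop]
  | cons p rest ih =>
    have hguard : ¬ (1 < m ∧ PySem.Int.mod m p = 0) := by
      rintro ⟨h1, -⟩; omega
    have hdo : divOut (m.toNat + 1) p m 0 = (m, 0) := by
      rw [divOut, if_neg hguard]
    rw [expLoop]
    simp only [hdo]
    rw [ih]
    simp

theorem exponents_eq (limit n : Int)
    (hsm : n ≤ 1 ∨ n.toNat ∣ pvSmoothBound limit n) :
    exponents (pvPRIMES.filter (fun p => decide (p ≤ limit))) n =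
      some ((pvPRIMES.filter (fun p => decide (p ≤ limit))).map (fun x => pvEx n x.toNat)) := by
  rcases (by omega : n ≤ 1 ∨ 1 < n) with hn | hn
  · rw [exponents]
    rw [expLoop_le_one _ n hn]
    have hmap : (pvPRIMES.filter (fun p => decide (p ≤ limit))).map (fun _ => (0:Int)) =
        (pvPRIMES.filter (fun p => decide (p ≤ limit))).map (fun x => pvEx n x.toNat) := by
      refine List.map_congr_left ?_
      intro x _
      have h01 : n.toNat = 0 ∨ n.toNat = 1 := by omega
      rcases h01 with h01 | h01 <;> simp [pvEx, h01]
    simp only [hmap]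
    simp
    omega
  · have hdvd : n.toNat ∣ pvSmoothBound limit n := hsm.resolve_left (by omega)
    obtain ⟨m', heq, hm'1, hzero, hpres, hm'd⟩ :=
      expLoop_spec (pvPRIMES.filter (fun p => decide (p ≤ limit)))
        (fun x hx => ⟨(pv_avail_elim limit x hx).1, (pv_avail_elim limit x hx).2.2.2⟩)
        (pv_avail_nodup limit) n (by omega) []
    have hm'le : m' = 1 := by
      by_contra hne
      have hm'2 : 1 < m' := by
        rcases lt_or_ge 1 m' with h | h
        · exact h
        · omega
      obtain ⟨q, hq, hqd⟩ := Nat.exists_prime_and_dvd (by omega : m'.toNat ≠ 1)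
      have hm'pos : 0 < m'.toNat.factorization q :=
        Nat.Prime.factorization_pos_of_dvd hq (by omega) hqd
      by_cases hmem : (q : Int) ∈ pvPRIMES.filter (fun p => decide (p ≤ limit))
      · have := hzero ((q : Int)) hmem
        rw [Int.toNat_natCast] at this
        omega
      · have hfq := hpres q hmem
        have hqn : q ∣ n.toNat := by
          have hmn : m'.toNat ∣ n.toNat := (pv_dvd_cast m' n (by omega) (by omega)).mp hm'd
          exact hqd.trans hmn
        obtain ⟨hl, h29⟩ := pv_smooth_elim limit n hn hdvd q hq hqn
        exact hmem (pv_mem_avail limit q hq h29 hl)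
    rw [exponents]
    rw [heq]
    simp [hm'le]

-- count in prime_factors = exponent, for every n (not just n ≥ 1)
theorem pf_count_ex (n : Int) (q : Nat) : ((prime_factors n).count (q : Int) : Int) = pvEx n q := by
  rcases (by omega : n ≤ 0 ∨ 0 < n) with h | h
  · rw [prime_factors_nil n (by omega)]
    have : n.toNat = 0 := by omega
    simp [pvEx, this]
  · rw [pf_count n q (by omega)]
    rfl


theorem get_monzo_witness_ok :
    Dom_get_monzo pvWitness_get_monzo.1 pvWitness_get_monzo.2.1 pvWitness_get_monzo.2.2 ∧
    Pre_get_monzo pvWitness_get_monzo.1 pvWitness_get_monzo.2.1 pvWitness_get_monzo.2.2 := by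
  constructor <;> decide

theorem pv_zipWith_sub_map (l : List Int) (f g : Int → Int) :
    List.zipWith (fun a b => a - b) (l.map f) (l.map g) = l.map (fun x => f x - g x) := by
  induction l with
  | nil => simp
  | cons x xs ih => simp [ih]

theorem get_monzo_main (limit n d : Int) (hpre : Pre_get_monzo limit n d) :
    get_monzo limit n d = get_monzo_alt limit n d := by
  obtain ⟨hsn, hsd⟩ := hpre
  have hfa : ∀ (m : Int), (m ≤ 1 ∨ m.toNat ∣ pvSmoothBound limit m) →
      ∀ q ∈ prime_factors m, q ∈ pvPRIMES.filter (fun p => decide (p ≤ limit)) := by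
    intro m hsm q hq
    rcases (by omega : m ≤ 0 ∨ 1 ≤ m) with h | h
    · rw [prime_factors_nil m (by omega)] at hq
      simp at hq
    · exact pf_mem_avail limit m h hsm q hq
  obtain ⟨m1, he1, hl1, hv1⟩ :=
    foldl_bump_spec (pvPRIMES.filter (fun p => decide (p ≤ limit))) (pv_avail_nodup limit) 1
      (prime_factors n) (hfa n hsn)
      (List.replicate (pvPRIMES.filter (fun p => decide (p ≤ limit))).length 0) (by simp)
  obtain ⟨m2, he2, hl2, hv2⟩ :=
    foldl_bump_spec (pvPRIMES.filter (fun p => decide (p ≤ limit))) (pv_avail_nodup limit) (-1)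
      (prime_factors d) (hfa d hsd) m1 hl1
  have hA : get_monzo limit n d = m2 := by
    rw [get_monzo]
    simp only [he1, he2]
  have hB : get_monzo_alt limit n d =
      (pvPRIMES.filter (fun p => decide (p ≤ limit))).map
        (fun x => pvEx n x.toNat - pvEx d x.toNat) := by
    rw [get_monzo_alt]
    simp only [exponents_eq limit n hsn, exponents_eq limit d hsd]
    exact pv_zipWith_sub_map _ _ _
  rw [hA, hB]
  apply List.ext_getElem
  · rw [hl2]
    simp
  · intro j hj1 hj2
    have hj : j < (pvPRIMES.filter (fun p => decide (p ≤ limit))).length := by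
      rw [← hl2]; exact hj1
    have hmem : (pvPRIMES.filter (fun p => decide (p ≤ limit)))[j] ∈
        pvPRIMES.filter (fun p => decide (p ≤ limit)) := List.getElem_mem hj
    have h2le := (pv_avail_elim limit _ hmem).1
    have hcastj : (((pvPRIMES.filter (fun p => decide (p ≤ limit)))[j].toNat : Nat) : Int) =
        (pvPRIMES.filter (fun p => decide (p ≤ limit)))[j] := Int.toNat_of_nonneg (by omega)
    have hgetd : m2[j] = m2.getD j 0 := by
      rw [List.getD_eq_getElem?_getD, List.getElem?_eq_getElem hj1]
      rfl
    rw [hgetd, hv2 j hj, hv1 j hj]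
    have hrep : (List.replicate (pvPRIMES.filter (fun p => decide (p ≤ limit))).length (0:Int)).getD j 0 = 0 := by
      rw [List.getD_eq_getElem?_getD, List.getElem?_eq_getElem (by simpa using hj)]
      simp
    rw [hrep]
    rw [List.getElem_map]
    have hcn : (((prime_factors n).count ((pvPRIMES.filter (fun p => decide (p ≤ limit)))[j]) : Int)) =
        pvEx n ((pvPRIMES.filter (fun p => decide (p ≤ limit)))[j]).toNat := by
      rw [← hcastj]
      exact pf_count_ex n _
    have hcd : (((prime_factors d).count ((pvPRIMES.filter (fun p => decide (p ≤ limit)))[j]) : Int)) =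
        pvEx d ((pvPRIMES.filter (fun p => decide (p ≤ limit)))[j]).toNat := by
      rw [← hcastj]
      exact pf_count_ex d _
    rw [hcn, hcd]
    ring

-- ===== VERDICT (by name: the statement is the Claim_ definition above) =====
theorem get_monzo_spec : Claim_equal_get_monzo := by
  intro limit n d _ hpre
  unfold Spec_get_monzo
  exact get_monzo_main limit n d hpre
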